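-- pv_equiv track=rewrite | github.com/sarbeshtiwari/arc-agi-3 | environment_files/tg01/tg01.py | _zone_king_center
-- ===== SOURCE A (Python) =====
-- from typing import Any, Dict, List, Optional, Set, Tuple
--
-- GRID_ROWS = 20
--
-- GRID_COLS = 20
--
-- ZONE_KING = 4
--
-- def _zone_king_center(
--     king_r0: int,
--     king_r1: int,
--     king_c0: int,
--     king_c1: int,
--     tl: int,
--     tr: int,
--     bl: int,
--     br: int,
-- ) -> List[List[int]]:
--     result: List[List[int]] = []
--     for r in range(GRID_ROWS):
--         row: List[int] = []
--         for c in range(GRID_COLS):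
--             if king_r0 <= r <= king_r1 and king_c0 <= c <= king_c1:
--                 row.append(ZONE_KING)
--             elif r <= (king_r0 + king_r1) // 2 and c <= (king_c0 + king_c1) // 2:
--                 row.append(tl)
--             elif r <= (king_r0 + king_r1) // 2:
--                 row.append(tr)
--             elif c <= (king_c0 + king_c1) // 2:
--                 row.append(bl)
--             else:
--                 row.append(br)
--         result.append(row)
--     return result
-- ===== SOURCE B (Python) =====
-- from typing import List
--
-- GRID_ROWS = 20
-- GRID_COLS = 20
-- ZONE_KING = 4
--
--
-- def _zone_king_center(
--     king_r0: int,
--     king_r1: int,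
--     king_c0: int,
--     king_c1: int,
--     tl: int,
--     tr: int,
--     bl: int,
--     br: int,
-- ) -> List[List[int]]:
--     # Quadrant fill by row slices, then overwrite the king rectangle.
--     rm = (king_r0 + king_r1) // 2
--     cm = (king_c0 + king_c1) // 2
--     left = max(0, min(GRID_COLS, cm + 1))          # cells of each row in the left quadrants
--     c_lo = max(0, min(GRID_COLS, king_c0))         # king rectangle clamped to the grid
--     c_hi = max(c_lo, min(GRID_COLS, king_c1 + 1))
--
--     def make_row(r: int) -> List[int]:
--         if r <= rm:
--             row = [tl] * left + [tr] * (GRID_COLS - left)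
--         else:
--             row = [bl] * left + [br] * (GRID_COLS - left)
--         if king_r0 <= r <= king_r1:
--             row[c_lo:c_hi] = [ZONE_KING] * (c_hi - c_lo)
--         return row
--
--     return [make_row(r) for r in range(GRID_ROWS)]
-- ===== Notes on version B (the rewrite author's own statement) =====
-- stated objective: alternative
-- what changed: Replaces A's 400 per-cell four-way conditional appends by a region fill: each row is built once by list repetition/concatenation from its quadrant defaults, and the clamped king rectangle is then overwritten by a slice assignment.
import Mathlib
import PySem

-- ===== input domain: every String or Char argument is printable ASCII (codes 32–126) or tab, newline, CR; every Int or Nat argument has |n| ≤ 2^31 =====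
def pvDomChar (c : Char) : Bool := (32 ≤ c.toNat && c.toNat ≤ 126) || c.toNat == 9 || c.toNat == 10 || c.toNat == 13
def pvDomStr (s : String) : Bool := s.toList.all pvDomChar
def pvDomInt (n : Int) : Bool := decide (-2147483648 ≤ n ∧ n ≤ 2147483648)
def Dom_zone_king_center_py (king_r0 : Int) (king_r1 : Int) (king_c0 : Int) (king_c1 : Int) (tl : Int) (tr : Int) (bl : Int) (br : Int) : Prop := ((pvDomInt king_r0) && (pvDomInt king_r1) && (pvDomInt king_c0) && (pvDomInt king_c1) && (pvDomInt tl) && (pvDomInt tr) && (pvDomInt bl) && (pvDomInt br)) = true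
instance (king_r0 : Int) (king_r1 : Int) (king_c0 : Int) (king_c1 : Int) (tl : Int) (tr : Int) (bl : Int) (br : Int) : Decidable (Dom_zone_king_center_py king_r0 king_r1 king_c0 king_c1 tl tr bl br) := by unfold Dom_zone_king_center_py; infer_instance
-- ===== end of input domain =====

-- B builds each row by quadrant region fill (list repetition + concatenation) and then
-- overwrites the clamped king rectangle with a slice write, instead of A's per-cell 4-way branch.

-- ===== PORT A =====
-- literal transliteration: two nested for-loops appending per cell
def zone_king_center_py (king_r0 : Int) (king_r1 : Int) (king_c0 : Int) (king_c1 : Int) (tl : Int) (tr : Int) (bl : Int) (br : Int) : List (List Int) :=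
  (PySem.List.pyRange 0 20 1).foldl (fun result r =>
    result ++ [ (PySem.List.pyRange 0 20 1).foldl (fun row c =>
      row ++ [ if king_r0 ≤ r ∧ r ≤ king_r1 ∧ king_c0 ≤ c ∧ c ≤ king_c1 then (4 : Int)
               else if r ≤ PySem.Int.floordiv (king_r0 + king_r1) 2 ∧ c ≤ PySem.Int.floordiv (king_c0 + king_c1) 2 then tl
               else if r ≤ PySem.Int.floordiv (king_r0 + king_r1) 2 then tr
               else if c ≤ PySem.Int.floordiv (king_c0 + king_c1) 2 then bl
               else br ]) [] ]) []

-- ===== PORT B =====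
-- literal transliteration of Source B; the clamped counts are nonnegative, so .toNat is exact
def zone_king_center_py_alt (king_r0 : Int) (king_r1 : Int) (king_c0 : Int) (king_c1 : Int) (tl : Int) (tr : Int) (bl : Int) (br : Int) : List (List Int) :=
  let rm := PySem.Int.floordiv (king_r0 + king_r1) 2
  let cm := PySem.Int.floordiv (king_c0 + king_c1) 2
  let left := (max 0 (min 20 (cm + 1))).toNat
  let cLo := (max 0 (min 20 king_c0)).toNat
  let cHi := (max (cLo : Int) (min 20 (king_c1 + 1))).toNat
  (PySem.List.pyRange 0 20 1).map (fun r =>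
    let row := if r ≤ rm then List.replicate left tl ++ List.replicate (20 - left) tr
               else List.replicate left bl ++ List.replicate (20 - left) br
    if king_r0 ≤ r ∧ r ≤ king_r1 then
      -- row[cLo:cHi] = [ZONE_KING]*(cHi-cLo)  (0 ≤ cLo ≤ cHi ≤ 20 by the clamps)
      row.take cLo ++ List.replicate (cHi - cLo) (4 : Int) ++ row.drop cHi
    else row)

-- ===== PRECONDITION & SPEC =====
def Spec_zone_king_center_py (king_r0 : Int) (king_r1 : Int) (king_c0 : Int) (king_c1 : Int) (tl : Int) (tr : Int) (bl : Int) (br : Int) (out : List (List Int)) : Prop := out = zone_king_center_py_alt king_r0 king_r1 king_c0 king_c1 tl tr bl br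
instance (king_r0 : Int) (king_r1 : Int) (king_c0 : Int) (king_c1 : Int) (tl : Int) (tr : Int) (bl : Int) (br : Int) (out : List (List Int)) : Decidable (Spec_zone_king_center_py king_r0 king_r1 king_c0 king_c1 tl tr bl br out) := by unfold Spec_zone_king_center_py; infer_instance

-- ===== CLAIM (what is proved, stated in full; the proofs are below) =====
def Claim_equal_zone_king_center_py : Prop := ∀ (king_r0 : Int) (king_r1 : Int) (king_c0 : Int) (king_c1 : Int) (tl : Int) (tr : Int) (bl : Int) (br : Int), Dom_zone_king_center_py king_r0 king_r1 king_c0 king_c1 tl tr bl br → Spec_zone_king_center_py king_r0 king_r1 king_c0 king_c1 tl tr bl br (zone_king_center_py king_r0 king_r1 king_c0 king_c1 tl tr bl br)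

-- ===== LEMMAS AND PROOFS =====

-- a replicate-fill row, seen cell by cell
theorem repl_row_eq_map_range {α : Type} (n k : ℕ) (hk : k ≤ n) (x y : α) :
    List.replicate k x ++ List.replicate (n - k) y
      = (List.range n).map (fun c => if c < k then x else y) := by
  apply List.ext_getElem
  · simp; omega
  · intro i h1 h2
    simp only [List.getElem_map, List.getElem_range]
    rcases lt_or_ge i k with h | h
    · rw [List.getElem_append_left (by simpa using h)]
      simp [h]
    · rw [List.getElem_append_right (by simpa using h)]
      simp only [List.getElem_replicate]
      rw [if_neg (by omega)]

-- slice write on a range-map row, seen cell by cell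
theorem slice_write_eq_map_range {α : Type} (n a b : ℕ) (ha : a ≤ b) (hb : b ≤ n)
    (f : ℕ → α) (x : α) :
    ((List.range n).map f).take a ++ List.replicate (b - a) x ++ ((List.range n).map f).drop b
      = (List.range n).map (fun c => if a ≤ c ∧ c < b then x else f c) := by
  apply List.ext_getElem
  · simp; omega
  · intro i h1 h2
    simp only [List.getElem_map, List.getElem_range]
    rcases lt_or_ge i a with h | h
    · rw [List.getElem_append_left (by simp; omega)]
      rw [List.getElem_append_left (by simp; omega)]
      simp only [List.getElem_take, List.getElem_map, List.getElem_range]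
      rw [if_neg (by omega)]
    · rcases lt_or_ge i b with h' | h'
      · rw [List.getElem_append_left (by simp; omega)]
        rw [List.getElem_append_right (by simp; omega)]
        simp only [List.getElem_replicate]
        rw [if_pos ⟨h, h'⟩]
      · rw [List.getElem_append_right (by simp; omega)]
        simp only [List.getElem_drop, List.getElem_map, List.getElem_range]
        rw [if_neg (by omega)]
        congr 1
        simp; omega

theorem pyRange20 : PySem.List.pyRange 0 20 1 = (List.range 20).map (fun k : ℕ => (k : Int)) := by
  decide

theorem zone_king_center_py_spec : Claim_equal_zone_king_center_py := by
  intro king_r0 king_r1 king_c0 king_c1 tl tr bl br _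
  unfold Spec_zone_king_center_py zone_king_center_py zone_king_center_py_alt
  simp only [PySem.List.foldl_append_singleton_eq_map, List.nil_append]
  apply List.map_congr_left
  intro r hr
  rw [PySem.List.mem_pyRange_one] at hr
  dsimp only
  set rm := PySem.Int.floordiv (king_r0 + king_r1) 2 with hrm
  set cm := PySem.Int.floordiv (king_c0 + king_c1) 2 with hcm
  set left := (max 0 (min 20 (cm + 1))).toNat with hleft
  set cLo := (max 0 (min 20 king_c0)).toNat with hcLo
  set cHi := (max (cLo : Int) (min 20 (king_c1 + 1))).toNat with hcHi
  have hleft20 : left ≤ 20 := by omega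
  have hLo : cLo ≤ cHi := by omega
  have hHi : cHi ≤ 20 := by omega
  rw [pyRange20, List.map_map]
  by_cases hk : king_r0 ≤ r ∧ r ≤ king_r1
  · rw [if_pos hk]
    by_cases hr2 : r ≤ rm
    · rw [if_pos hr2, repl_row_eq_map_range 20 left hleft20,
        slice_write_eq_map_range 20 cLo cHi hLo hHi]
      apply List.map_congr_left
      intro c hc
      rw [List.mem_range] at hc
      simp only [Function.comp_apply]
      have hcc : (king_c0 ≤ (c : Int) ∧ (c : Int) ≤ king_c1) ↔ (cLo ≤ c ∧ c < cHi) := by omega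
      have hcm' : ((c : Int) ≤ cm) ↔ (c < left) := by omega
      by_cases h4 : cLo ≤ c ∧ c < cHi
      · rw [if_pos h4, if_pos ⟨hk.1, hk.2, hcc.mpr h4⟩]
      · rw [if_neg h4]
        rw [if_neg (fun hcon => h4 (hcc.mp ⟨hcon.2.2.1, hcon.2.2.2⟩))]
        by_cases h5 : c < left
        · rw [if_pos h5, if_pos ⟨hr2, hcm'.mpr h5⟩]
        · rw [if_neg h5, if_neg (fun hcon => h5 (hcm'.mp hcon.2)), if_pos hr2]
    · rw [if_neg hr2, repl_row_eq_map_range 20 left hleft20,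
        slice_write_eq_map_range 20 cLo cHi hLo hHi]
      apply List.map_congr_left
      intro c hc
      rw [List.mem_range] at hc
      simp only [Function.comp_apply]
      have hcc : (king_c0 ≤ (c : Int) ∧ (c : Int) ≤ king_c1) ↔ (cLo ≤ c ∧ c < cHi) := by omega
      have hcm' : ((c : Int) ≤ cm) ↔ (c < left) := by omega
      by_cases h4 : cLo ≤ c ∧ c < cHi
      · rw [if_pos h4, if_pos ⟨hk.1, hk.2, hcc.mpr h4⟩]
      · rw [if_neg h4]
        rw [if_neg (fun hcon => h4 (hcc.mp ⟨hcon.2.2.1, hcon.2.2.2⟩))]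
        by_cases h5 : c < left
        · rw [if_pos h5, if_neg (fun hcon => hr2 hcon.1), if_neg hr2, if_pos (hcm'.mpr h5)]
        · rw [if_neg h5, if_neg (fun hcon => hr2 hcon.1), if_neg hr2,
            if_neg (fun hcon => h5 (hcm'.mp hcon))]
  · rw [if_neg hk]
    by_cases hr2 : r ≤ rm
    · rw [if_pos hr2, repl_row_eq_map_range 20 left hleft20]
      apply List.map_congr_left
      intro c hc
      rw [List.mem_range] at hc
      simp only [Function.comp_apply]
      have hcm' : ((c : Int) ≤ cm) ↔ (c < left) := by omega
      rw [if_neg (fun hcon => hk ⟨hcon.1, hcon.2.1⟩)]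
      by_cases h5 : c < left
      · rw [if_pos h5, if_pos ⟨hr2, hcm'.mpr h5⟩]
      · rw [if_neg h5, if_neg (fun hcon => h5 (hcm'.mp hcon.2)), if_pos hr2]
    · rw [if_neg hr2, repl_row_eq_map_range 20 left hleft20]
      apply List.map_congr_left
      intro c hc
      rw [List.mem_range] at hc
      simp only [Function.comp_apply]
      have hcm' : ((c : Int) ≤ cm) ↔ (c < left) := by omega
      rw [if_neg (fun hcon => hk ⟨hcon.1, hcon.2.1⟩)]
      by_cases h5 : c < left
      · rw [if_pos h5, if_neg (fun hcon => hr2 hcon.1), if_neg hr2, if_pos (hcm'.mpr h5)]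
      · rw [if_neg h5, if_neg (fun hcon => hr2 hcon.1), if_neg hr2,
          if_neg (fun hcon => h5 (hcm'.mp hcon))]
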